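-- pv_equiv track=rewrite | github.com/tandyfor/Python_Bootcamp | AP1_Py_T01-1/src/exercise3/task3.py | figure_counter
-- ===== SOURCE A (Python) =====
-- def count_neighbours(data, x, y):
--     counter = 0
--     try:
--         if data[x][y] == 1:
--             counter += 1
--             data[x][y] = 0
--             counter += count_neighbours(data, x, y + 1)
--             counter += count_neighbours(data, x + 1, y - 1)
--             counter += count_neighbours(data, x + 1, y)
--             counter += count_neighbours(data, x + 1, y + 1)
--         return counter
--     except IndexError:
--         return 0
--
-- def is_square(data, x, y):
--     side_size = 0
--     try:
--         while data[x + side_size][y] == 1: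
--             side_size += 1
--     except IndexError:
--         pass
--     count = count_neighbours(data, x, y)
--     return True if side_size ** 2 == count and count != 0 else False
--
-- def figure_counter(data):
--     square = 0
--     circle = 0
--
--     for i in range(len(data)):
--         for j in range(len(data[i])):
--             if data[i][j] == 1:
--                 if is_square(data, i, j):
--                     square += 1
--                 else:
--                     circle += 1
--
--     return square, circle
-- ===== SOURCE B (Python) =====
-- def figure_counter(data):
--     square = 0
--     circle = 0
--     n = len(data)
--     for i in range(n):
--         for j in range(len(data[i])):
--             if data[i][j] == 1:
--                 # length of the vertical run of 1s below (i, j), measured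
--                 # before the figure is flooded away
--                 side = 0
--                 k = i
--                 while k < n and j < len(data[k]) and data[k][j] == 1:
--                     side += 1
--                     k += 1
--                 # flood fill with an explicit stack: pop a cell, skip it
--                 # unless it is (still) a 1, zero it, count it, push the
--                 # neighbours the fill explores (right, and the three below)
--                 count = 0
--                 stack = [(i, j)]
--                 while stack:
--                     x, y = stack.pop()
--                     try:
--                         if data[x][y] != 1:
--                             continue
--                     except IndexError:
--                         continue
--                     data[x][y] = 0
--                     count += 1
--                     stack += [(x + 1, y + 1), (x + 1, y), (x + 1, y - 1), (x, y + 1)]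
--                 if side * side == count:
--                     square += 1
--                 else:
--                     circle += 1
--     return square, circle
-- ===== Notes on version B (the rewrite author's own statement) =====
-- stated objective: alternative
-- what changed: The recursive flood fill is replaced by an explicit stack loop (pop a cell, zero-and-count it if it is a 1, push its four neighbours) and the side measurement and square test are folded inline into figure_counter, removing the helper-function recursion entirely.
import Mathlib
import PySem

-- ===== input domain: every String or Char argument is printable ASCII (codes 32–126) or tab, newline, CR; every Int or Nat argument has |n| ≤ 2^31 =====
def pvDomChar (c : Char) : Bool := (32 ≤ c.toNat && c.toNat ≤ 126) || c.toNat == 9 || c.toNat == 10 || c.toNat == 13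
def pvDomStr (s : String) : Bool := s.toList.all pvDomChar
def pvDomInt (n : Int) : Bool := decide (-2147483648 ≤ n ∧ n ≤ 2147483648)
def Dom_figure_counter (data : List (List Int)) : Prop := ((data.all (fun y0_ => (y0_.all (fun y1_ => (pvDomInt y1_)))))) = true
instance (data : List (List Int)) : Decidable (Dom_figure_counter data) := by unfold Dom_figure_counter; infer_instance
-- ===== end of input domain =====

-- B replaces the recursive flood fill (and its helper functions) by an explicit stack loop folded
-- inline into figure_counter; equivalence is about the RETURN value only (the Python originals
-- both also mutate `data` in place).

-- ===== PORT A =====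
-- data[x][y] as an Option (none = IndexError on either index), Python negative-index semantics included
def pyGet2 (d : List (List Int)) (x y : Int) : Option Int :=
  match PySem.List.pyGet? d x with
  | none => none
  | some row => PySem.List.pyGet? row y

-- data[x][y] = v (total form; only used right after a successful pyGet2, where both indices are in range)
def pySet2 (d : List (List Int)) (x y v : Int) : List (List Int) :=
  PySem.List.pySetD d x (PySem.List.pySetD (PySem.List.pyGetD d x []) y v)

-- number of cells equal to 1: the termination measure (each recursive call happens after a 1 was zeroed)
def ones (d : List (List Int)) : Nat := (d.map (fun r => r.count 1)).sum

-- count_neighbours, fuel-based (fuel only makes the recursion structural; `ones d + 1` is always enough)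
def cnA (fuel : Nat) (d : List (List Int)) (x y : Int) : List (List Int) × Int :=
  match fuel with
  | 0 => (d, 0)
  | f + 1 =>
    match pyGet2 d x y with
    | none => (d, 0)                            -- except IndexError: return 0
    | some v =>
      if v = 1 then
        let d0 := pySet2 d x y 0
        let r1 := cnA f d0 x (y + 1)
        let r2 := cnA f r1.1 (x + 1) (y - 1)
        let r3 := cnA f r2.1 (x + 1) y
        let r4 := cnA f r3.1 (x + 1) (y + 1)
        (r4.1, 1 + r1.2 + r2.2 + r3.2 + r4.2)
      else (d, 0)

def count_neighboursA (d : List (List Int)) (x y : Int) : List (List Int) × Int :=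
  cnA (ones d + 1) d x y

-- the while-loop of is_square (fuel `d.length + 1` suffices for the non-negative x figure_counter passes)
def sideA (d : List (List Int)) (x y : Int) (side : Nat) (fuel : Nat) : Nat :=
  match fuel with
  | 0 => side
  | f + 1 =>
    if pyGet2 d (x + (side : Int)) y = some 1 then sideA d x y (side + 1) f else side

def is_squareA (d : List (List Int)) (x y : Int) : List (List Int) × Bool :=
  let side := sideA d x y 0 (d.length + 1)
  let r := count_neighboursA d x y
  (r.1, decide (((side : Int)) ^ 2 = r.2 ∧ r.2 ≠ 0))

-- body of the inner j-loop of figure_counter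
def stepA (i : Nat) (st : List (List Int) × Int × Int) (j : Nat) : List (List Int) × Int × Int :=
  if pyGet2 st.1 (i : Int) (j : Int) = some 1 then
    let r := is_squareA st.1 (i : Int) (j : Int)
    if r.2 then (r.1, st.2.1 + 1, st.2.2) else (r.1, st.2.1, st.2.2 + 1)
  else st

-- body of the outer i-loop: `for j in range(len(data[i]))` over the current data
def rowA (st : List (List Int) × Int × Int) (i : Nat) : List (List Int) × Int × Int :=
  (List.range ((st.1.getD i []).length)).foldl (stepA i) st

def figure_counter (data : List (List Int)) : Int × Int :=
  let r := (List.range data.length).foldl rowA (data, (0 : Int), (0 : Int))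
  (r.2.1, r.2.2)

-- ===== PORT B =====
-- lemmas cited by cnStack's termination proof (a zeroed 1 strictly decreases `ones`)
theorem pyGet?_some_elim {α : Type} (xs : List α) (i : Int) (v : α)
    (h : PySem.List.pyGet? xs i = some v) :
    ∃ k : Nat, PySem.List.pyIdx? xs.length i = some k ∧ k < xs.length ∧ xs[k]? = some v := by
  cases hk : PySem.List.pyIdx? xs.length i with
  | none => simp [PySem.List.pyGet?, hk] at h
  | some k =>
    refine ⟨k, rfl, ?_, ?_⟩ <;> simp [PySem.List.pyGet?, hk] at h
    · exact (List.getElem?_eq_some_iff.mp h).1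
    · exact h

theorem pySetD_eq_set {α : Type} (xs : List α) (i : Int) (v : α) (k : Nat)
    (hk : PySem.List.pyIdx? xs.length i = some k) :
    PySem.List.pySetD xs i v = xs.set k v := by
  simp [PySem.List.pySetD, PySem.List.pySet?, hk]

theorem pyGetD_eq_getD {α : Type} (xs : List α) (i : Int) (d : α) (k : Nat)
    (hk : PySem.List.pyIdx? xs.length i = some k) :
    PySem.List.pyGetD xs i d = xs.getD k d := by
  simp [PySem.List.pyGetD, PySem.List.pyGet?, hk, List.getD_eq_getElem?_getD]

theorem ones_set (d : List (List Int)) (k : Nat) (r' : List Int) (h : k < d.length) :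
    ones (d.set k r') + (d.getD k []).count 1 = ones d + r'.count 1 := by
  induction d generalizing k with
  | nil => simp at h
  | cons hd tl ih =>
    cases k with
    | zero => simp [ones]; omega
    | succ k =>
      have := ih k (by simpa using h)
      simp only [List.set_cons_succ, ones, List.map_cons, List.sum_cons, List.getD_cons_succ]
      simp only [ones] at this
      omega

theorem ones_pySet2 (d : List (List Int)) (x y : Int) (h : pyGet2 d x y = some 1) :
    ones (pySet2 d x y 0) + 1 = ones d := by
  unfold pyGet2 at h
  cases hr : PySem.List.pyGet? d x with
  | none => rw [hr] at h; simp at h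
  | some row =>
    rw [hr] at h
    obtain ⟨k, hk, hklt, hget⟩ := pyGet?_some_elim d x row hr
    obtain ⟨m, hm, hmlt, hgetm⟩ := pyGet?_some_elim row y 1 h
    have hrow : d.getD k [] = row := by
      rw [List.getD_eq_getElem?_getD, hget]; rfl
    have hpg : PySem.List.pyGetD d x [] = row := by
      rw [pyGetD_eq_getD d x [] k hk, hrow]
    have hset2 : pySet2 d x y 0 = d.set k (row.set m 0) := by
      unfold pySet2
      rw [hpg, pySetD_eq_set row y 0 m hm, pySetD_eq_set d x _ k hk]
    have hrm : row[m] = 1 := (List.getElem?_eq_some_iff.mp hgetm).2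
    have hcnt : (row.set m 0).count 1 + 1 = row.count 1 := by
      have := List.count_set (a := (0:Int)) (b := (1:Int)) (l := row) (i := m) hmlt
      have hpos : 0 < row.count 1 := List.count_pos_iff.mpr (by
        have : row[m] ∈ row := List.getElem_mem hmlt
        rwa [hrm] at this)
      simp [hrm] at this
      omega
    have := ones_set d k (row.set m 0) hklt
    rw [hset2, hrow] at *
    omega

-- iterative flood fill: explicit stack, head = top; a popped cell is skipped unless it is a 1
def cnStack (d : List (List Int)) (s : List (Int × Int)) (c : Int) : List (List Int) × Int :=
  match s with
  | [] => (d, c)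
  | (x, y) :: rest =>
    match h : pyGet2 d x y with
    | none => cnStack d rest c
    | some v =>
      if hv : v = 1 then
        cnStack (pySet2 d x y 0) ((x, y + 1) :: (x + 1, y - 1) :: (x + 1, y) :: (x + 1, y + 1) :: rest) (c + 1)
      else cnStack d rest c
termination_by (ones d, s.length)
decreasing_by
  · exact Prod.Lex.right _ (by simp)
  · exact Prod.Lex.left _ _ (by have := ones_pySet2 d x y (hv ▸ h); omega)
  · exact Prod.Lex.right _ (by simp)

-- B's bounds-checked vertical scan for the run of 1s below (i, j)
def sideB (d : List (List Int)) (n j k side : Nat) : Nat :=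
  if h : k < n ∧ j < (d.getD k []).length ∧ (d.getD k []).getD j 0 = 1 then
    sideB d n j (k + 1) (side + 1)
  else side
termination_by n - k
decreasing_by omega

-- body of B's inner j-loop (bounds are guaranteed by the ranges, so the cell test is a direct getD)
def stepB (n i : Nat) (st : List (List Int) × Int × Int) (j : Nat) : List (List Int) × Int × Int :=
  if (st.1.getD i []).getD j 0 = 1 then
    let side := sideB st.1 n j i 0
    let r := cnStack st.1 [((i : Int), (j : Int))] 0
    if ((side : Int) * side = r.2) then (r.1, st.2.1 + 1, st.2.2) else (r.1, st.2.1, st.2.2 + 1)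
  else st

def rowB (n : Nat) (st : List (List Int) × Int × Int) (i : Nat) : List (List Int) × Int × Int :=
  (List.range ((st.1.getD i []).length)).foldl (stepB n i) st

def figure_counter_alt (data : List (List Int)) : Int × Int :=
  let n := data.length
  let r := (List.range n).foldl (rowB n) (data, (0 : Int), (0 : Int))
  (r.2.1, r.2.2)

-- ===== PRECONDITION & SPEC =====
def Spec_figure_counter (data : List (List Int)) (out : Int × Int) : Prop := out = figure_counter_alt data
instance (data : List (List Int)) (out : Int × Int) : Decidable (Spec_figure_counter data out) := by unfold Spec_figure_counter; infer_instance

-- ===== CLAIM (what is proved, stated in full; the proofs are below) =====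
def Claim_equal_figure_counter : Prop := ∀ (data : List (List Int)), Dom_figure_counter data → Spec_figure_counter data (figure_counter data)

-- ===== LEMMAS AND PROOFS =====

theorem pySetD_len {α : Type} (xs : List α) (i : Int) (v : α) :
    (PySem.List.pySetD xs i v).length = xs.length := by
  cases hk : PySem.List.pyIdx? xs.length i <;>
    simp [PySem.List.pySetD, PySem.List.pySet?, hk]

theorem pySet2_len (d : List (List Int)) (x y v : Int) : (pySet2 d x y v).length = d.length := by
  unfold pySet2; exact pySetD_len d x _

theorem pySet2_rowlen (d : List (List Int)) (x y v : Int) (k' : Nat) :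
    ((pySet2 d x y v).getD k' []).length = (d.getD k' []).length := by
  unfold pySet2
  cases hk : PySem.List.pyIdx? d.length x with
  | none => simp [PySem.List.pySetD, PySem.List.pySet?, hk]
  | some k =>
    have hrow : PySem.List.pyGetD d x [] = d.getD k [] := by
      simp [PySem.List.pyGetD, PySem.List.pyGet?, hk, List.getD_eq_getElem?_getD]
    rw [hrow]
    rw [show PySem.List.pySetD d x (PySem.List.pySetD (d.getD k []) y v)
        = d.set k (PySem.List.pySetD (d.getD k []) y v) by
      simp [PySem.List.pySetD, PySem.List.pySet?, hk]]
    by_cases hkk : k = k'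
    · subst hkk
      by_cases hlt : k < d.length
      · rw [List.getD_eq_getElem?_getD, List.getElem?_set_self hlt, List.getD_eq_getElem?_getD]
        simp [List.getElem?_eq_getElem hlt]
      · rw [List.set_eq_of_length_le (by omega)]
    · rw [List.getD_eq_getElem?_getD, List.getElem?_set_ne hkk, ← List.getD_eq_getElem?_getD]

theorem cnA_ones_le (f : Nat) : ∀ (d : List (List Int)) (x y : Int), ones (cnA f d x y).1 ≤ ones d := by
  induction f with
  | zero => intro d x y; simp [cnA]
  | succ f ih =>
    intro d x y
    cases hg : pyGet2 d x y with
    | none => simp [cnA, hg]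
    | some v =>
      by_cases hv : v = 1
      · subst hv
        simp only [cnA, hg, if_true]
        have h0 := ones_pySet2 d x y hg
        have h1 := ih (pySet2 d x y 0) x (y + 1)
        have h2 := ih (cnA f (pySet2 d x y 0) x (y + 1)).1 (x + 1) (y - 1)
        have h3 := ih (cnA f (cnA f (pySet2 d x y 0) x (y + 1)).1 (x + 1) (y - 1)).1 (x + 1) y
        have h4 := ih (cnA f (cnA f (cnA f (pySet2 d x y 0) x (y + 1)).1 (x + 1) (y - 1)).1 (x + 1) y).1 (x + 1) (y + 1)
        omega
      · simp [cnA, hg, hv]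

theorem cnA_len (f : Nat) : ∀ (d : List (List Int)) (x y : Int), (cnA f d x y).1.length = d.length := by
  induction f with
  | zero => intro d x y; simp [cnA]
  | succ f ih =>
    intro d x y
    cases hg : pyGet2 d x y with
    | none => simp [cnA, hg]
    | some v =>
      by_cases hv : v = 1
      · subst hv
        simp only [cnA, hg, if_true]
        rw [ih, ih, ih, ih, pySet2_len]
      · simp [cnA, hg, hv]

theorem cnA_rowlen (f : Nat) : ∀ (d : List (List Int)) (x y : Int) (k : Nat),
    ((cnA f d x y).1.getD k []).length = (d.getD k []).length := by
  induction f with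
  | zero => intro d x y k; simp [cnA]
  | succ f ih =>
    intro d x y k
    cases hg : pyGet2 d x y with
    | none => simp [cnA, hg]
    | some v =>
      by_cases hv : v = 1
      · subst hv
        simp only [cnA, hg, if_true]
        rw [ih, ih, ih, ih, pySet2_rowlen]
      · simp [cnA, hg, hv]

theorem cnA_nonneg (f : Nat) : ∀ (d : List (List Int)) (x y : Int), 0 ≤ (cnA f d x y).2 := by
  induction f with
  | zero => intro d x y; simp [cnA]
  | succ f ih =>
    intro d x y
    cases hg : pyGet2 d x y with
    | none => simp [cnA, hg]
    | some v =>
      by_cases hv : v = 1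
      · subst hv
        simp only [cnA, hg, if_true]
        have h1 := ih (pySet2 d x y 0) x (y + 1)
        have h2 := ih (cnA f (pySet2 d x y 0) x (y + 1)).1 (x + 1) (y - 1)
        have h3 := ih (cnA f (cnA f (pySet2 d x y 0) x (y + 1)).1 (x + 1) (y - 1)).1 (x + 1) y
        have h4 := ih (cnA f (cnA f (cnA f (pySet2 d x y 0) x (y + 1)).1 (x + 1) (y - 1)).1 (x + 1) y).1 (x + 1) (y + 1)
        omega
      · simp [cnA, hg, hv]

theorem cnA_pos (f : Nat) (d : List (List Int)) (x y : Int) (hg : pyGet2 d x y = some 1) :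
    1 ≤ (cnA (f + 1) d x y).2 := by
  simp only [cnA, hg, if_true]
  have h1 := cnA_nonneg f (pySet2 d x y 0) x (y + 1)
  have h2 := cnA_nonneg f (cnA f (pySet2 d x y 0) x (y + 1)).1 (x + 1) (y - 1)
  have h3 := cnA_nonneg f (cnA f (cnA f (pySet2 d x y 0) x (y + 1)).1 (x + 1) (y - 1)).1 (x + 1) y
  have h4 := cnA_nonneg f (cnA f (cnA f (cnA f (pySet2 d x y 0) x (y + 1)).1 (x + 1) (y - 1)).1 (x + 1) y).1 (x + 1) (y + 1)
  omega

theorem cnA_fuel (N : Nat) : ∀ (d : List (List Int)) (x y : Int) (f f' : Nat),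
    ones d ≤ N → ones d < f → ones d < f' → cnA f d x y = cnA f' d x y := by
  induction N with
  | zero =>
    intro d x y f f' hN hf hf'
    obtain ⟨a, rfl⟩ : ∃ a, f = a + 1 := ⟨f - 1, by omega⟩
    obtain ⟨b, rfl⟩ : ∃ b, f' = b + 1 := ⟨f' - 1, by omega⟩
    cases hg : pyGet2 d x y with
    | none => simp [cnA, hg]
    | some v =>
      by_cases hv : v = 1
      · subst hv
        have := ones_pySet2 d x y hg
        omega
      · simp [cnA, hg, hv]
  | succ N ih =>
    intro d x y f f' hN hf hf'
    obtain ⟨a, rfl⟩ : ∃ a, f = a + 1 := ⟨f - 1, by omega⟩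
    obtain ⟨b, rfl⟩ : ∃ b, f' = b + 1 := ⟨f' - 1, by omega⟩
    cases hg : pyGet2 d x y with
    | none => simp [cnA, hg]
    | some v =>
      by_cases hv : v = 1
      · subst hv
        simp only [cnA, hg, if_true]
        have h0 := ones_pySet2 d x y hg
        have e1 : cnA a (pySet2 d x y 0) x (y + 1) = cnA b (pySet2 d x y 0) x (y + 1) :=
          ih _ _ _ _ _ (by omega) (by omega) (by omega)
        rw [← e1]
        have le1 := cnA_ones_le a (pySet2 d x y 0) x (y + 1)
        have e2 : cnA a (cnA a (pySet2 d x y 0) x (y + 1)).1 (x + 1) (y - 1)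
                = cnA b (cnA a (pySet2 d x y 0) x (y + 1)).1 (x + 1) (y - 1) :=
          ih _ _ _ _ _ (by omega) (by omega) (by omega)
        rw [← e2]
        have le2 := cnA_ones_le a (cnA a (pySet2 d x y 0) x (y + 1)).1 (x + 1) (y - 1)
        have e3 : cnA a (cnA a (cnA a (pySet2 d x y 0) x (y + 1)).1 (x + 1) (y - 1)).1 (x + 1) y
                = cnA b (cnA a (cnA a (pySet2 d x y 0) x (y + 1)).1 (x + 1) (y - 1)).1 (x + 1) y :=
          ih _ _ _ _ _ (by omega) (by omega) (by omega)
        rw [← e3]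
        have le3 := cnA_ones_le a (cnA a (cnA a (pySet2 d x y 0) x (y + 1)).1 (x + 1) (y - 1)).1 (x + 1) y
        have e4 : cnA a (cnA a (cnA a (cnA a (pySet2 d x y 0) x (y + 1)).1 (x + 1) (y - 1)).1 (x + 1) y).1 (x + 1) (y + 1)
                = cnA b (cnA a (cnA a (cnA a (pySet2 d x y 0) x (y + 1)).1 (x + 1) (y - 1)).1 (x + 1) y).1 (x + 1) (y + 1) :=
          ih _ _ _ _ _ (by omega) (by omega) (by omega)
        rw [← e4]
      · simp [cnA, hg, hv]

theorem cnStack_nil (d : List (List Int)) (c : Int) : cnStack d [] c = (d, c) := by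
  rw [cnStack]

theorem cnStack_cons_none (d : List (List Int)) (x y : Int) (s : List (Int × Int)) (c : Int)
    (hg : pyGet2 d x y = none) : cnStack d ((x, y) :: s) c = cnStack d s c := by
  rw [cnStack]; split
  · rfl
  · rename_i v heq; rw [hg] at heq; simp at heq

theorem cnStack_cons_one (d : List (List Int)) (x y : Int) (s : List (Int × Int)) (c : Int)
    (hg : pyGet2 d x y = some 1) :
    cnStack d ((x, y) :: s) c =
      cnStack (pySet2 d x y 0) ((x, y + 1) :: (x + 1, y - 1) :: (x + 1, y) :: (x + 1, y + 1) :: s) (c + 1) := by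
  rw [cnStack]; split
  · rename_i heq; rw [hg] at heq; simp at heq
  · rename_i w heq; rw [hg] at heq; injection heq with h2; simp [← h2]

theorem cnStack_cons_ne (d : List (List Int)) (x y : Int) (v : Int) (s : List (Int × Int)) (c : Int)
    (hg : pyGet2 d x y = some v) (hv : v ≠ 1) : cnStack d ((x, y) :: s) c = cnStack d s c := by
  rw [cnStack]; split
  · rfl
  · rename_i w heq; rw [hg] at heq; injection heq with h2; simp [← h2, hv]

theorem cnStack_sim (N : Nat) : ∀ (d : List (List Int)) (x y : Int) (s : List (Int × Int)) (c : Int),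
    ones d ≤ N →
    cnStack d ((x, y) :: s) c = (fun r => cnStack r.1 s (c + r.2)) (cnA (ones d + 1) d x y) := by
  induction N with
  | zero =>
    intro d x y s c hN
    cases hg : pyGet2 d x y with
    | none => rw [cnStack_cons_none _ _ _ _ _ hg]; simp [cnA, hg]
    | some v =>
      by_cases hv : v = 1
      · subst hv; have := ones_pySet2 d x y hg; omega
      · rw [cnStack_cons_ne _ _ _ _ _ _ hg hv]; simp [cnA, hg, hv]
  | succ N ih =>
    intro d x y s c hN
    cases hg : pyGet2 d x y with
    | none => rw [cnStack_cons_none _ _ _ _ _ hg]; simp [cnA, hg]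
    | some v =>
      by_cases hv : v = 1
      swap
      · rw [cnStack_cons_ne _ _ _ _ _ _ hg hv]; simp [cnA, hg, hv]
      subst hv
      have h0 := ones_pySet2 d x y hg
      rw [cnStack_cons_one _ _ _ _ _ hg]
      rw [ih (pySet2 d x y 0) x (y + 1) _ _ (by omega)]
      simp only []
      rw [cnA_fuel (ones (pySet2 d x y 0)) (pySet2 d x y 0) x (y + 1) _ (ones d) (le_refl _) (by omega) (by omega)]
      have le1 := cnA_ones_le (ones d) (pySet2 d x y 0) x (y + 1)
      rw [ih (cnA (ones d) (pySet2 d x y 0) x (y + 1)).1 (x + 1) (y - 1) _ _ (by omega)]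
      simp only []
      rw [cnA_fuel (ones (cnA (ones d) (pySet2 d x y 0) x (y + 1)).1) _ (x + 1) (y - 1) _ (ones d) (le_refl _) (by omega) (by omega)]
      have le2 := cnA_ones_le (ones d) (cnA (ones d) (pySet2 d x y 0) x (y + 1)).1 (x + 1) (y - 1)
      rw [ih (cnA (ones d) (cnA (ones d) (pySet2 d x y 0) x (y + 1)).1 (x + 1) (y - 1)).1 (x + 1) y _ _ (by omega)]
      simp only []
      rw [cnA_fuel (ones (cnA (ones d) (cnA (ones d) (pySet2 d x y 0) x (y + 1)).1 (x + 1) (y - 1)).1) _ (x + 1) y _ (ones d) (le_refl _) (by omega) (by omega)]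
      have le3 := cnA_ones_le (ones d) (cnA (ones d) (cnA (ones d) (pySet2 d x y 0) x (y + 1)).1 (x + 1) (y - 1)).1 (x + 1) y
      rw [ih (cnA (ones d) (cnA (ones d) (cnA (ones d) (pySet2 d x y 0) x (y + 1)).1 (x + 1) (y - 1)).1 (x + 1) y).1 (x + 1) (y + 1) _ _ (by omega)]
      simp only []
      rw [cnA_fuel (ones (cnA (ones d) (cnA (ones d) (cnA (ones d) (pySet2 d x y 0) x (y + 1)).1 (x + 1) (y - 1)).1 (x + 1) y).1) _ (x + 1) (y + 1) _ (ones d) (le_refl _) (by omega) (by omega)]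
      simp only [cnA, hg, if_true]
      congr 1
      ring

theorem cnStack_single (d : List (List Int)) (x y : Int) :
    cnStack d [(x, y)] 0 = count_neighboursA d x y := by
  rw [cnStack_sim (ones d) d x y [] 0 (le_refl _)]
  simp [cnStack_nil, count_neighboursA]

theorem cell_iff (d : List (List Int)) (a b : Nat) (w : Int) :
    pyGet2 d (a : Int) (b : Int) = some w ↔
      (a < d.length ∧ b < (d.getD a []).length ∧ (d.getD a []).getD b 0 = w) := by
  unfold pyGet2
  simp only [PySem.List.pyGet?_natCast]
  cases hda : d[a]? with
  | none =>
    have ha : ¬ a < d.length := by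
      intro h; rw [List.getElem?_eq_getElem h] at hda; simp at hda
    simp [ha]
  | some row =>
    have ha : a < d.length := by
      by_contra h
      rw [List.getElem?_eq_none (by omega)] at hda; simp at hda
    have hrow : d.getD a [] = row := by rw [List.getD_eq_getElem?_getD, hda]; rfl
    simp only [hrow, ha, true_and]
    constructor
    · intro h
      obtain ⟨hb, hv⟩ := List.getElem?_eq_some_iff.mp h
      exact ⟨hb, by rw [List.getD_eq_getElem?_getD, List.getElem?_eq_getElem hb]; exact hv⟩
    · rintro ⟨hb, hv⟩
      rw [List.getElem?_eq_getElem hb]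
      rw [List.getD_eq_getElem?_getD, List.getElem?_eq_getElem hb] at hv
      simpa using hv

theorem side_bridge (f : Nat) : ∀ (d : List (List Int)) (i j s : Nat), d.length ≤ i + s + f →
    sideA d (i : Int) (j : Int) s f = sideB d d.length j (i + s) s := by
  induction f with
  | zero =>
    intro d i j s hf
    rw [sideA, sideB, dif_neg]
    intro hcond
    omega
  | succ f ih =>
    intro d i j s hf
    have hcast : (i : Int) + (s : Int) = ((i + s : Nat) : Int) := by push_cast; ring
    rw [sideA, hcast]
    by_cases hc : (i + s) < d.length ∧ j < (d.getD (i + s) []).length ∧ (d.getD (i + s) []).getD j 0 = 1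
    · rw [if_pos ((cell_iff d (i + s) j 1).mpr ⟨hc.1, hc.2.1, hc.2.2⟩)]
      rw [sideB, dif_pos hc]
      have := ih d i j (s + 1) (by omega)
      rw [show i + (s + 1) = i + s + 1 from by omega] at this
      exact this
    · rw [if_neg (fun h => hc (by
        have := (cell_iff d (i + s) j 1).mp h
        exact this))]
      rw [sideB, dif_neg hc]

theorem foldl_congr_inv {α σ : Type} (P : σ → Prop) (f g : σ → α → σ) (l : List α) (s : σ)
    (hs : P s) (hp : ∀ s a, a ∈ l → P s → P (f s a)) (he : ∀ s a, a ∈ l → P s → f s a = g s a) :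
    l.foldl f s = l.foldl g s := by
  induction l generalizing s with
  | nil => rfl
  | cons a t ih =>
    simp only [List.foldl_cons]
    rw [← he s a (by simp) hs]
    exact ih (f s a) (hp s a (by simp) hs)
      (fun s' a' h' => hp s' a' (by simp [h'])) (fun s' a' h' => he s' a' (by simp [h']))

theorem foldl_pres {α σ : Type} (P : σ → Prop) (f : σ → α → σ) (l : List α) (s : σ)
    (hs : P s) (hp : ∀ s a, P s → P (f s a)) : P (l.foldl f s) := by
  induction l generalizing s with
  | nil => exact hs
  | cons a t ih => exact ih (f s a) (hp s a hs)

theorem stepA_len (i : Nat) (st : List (List Int) × Int × Int) (j : Nat) :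
    (stepA i st j).1.length = st.1.length := by
  unfold stepA is_squareA count_neighboursA
  dsimp only
  split
  · split <;> simp [cnA_len]
  · rfl

theorem stepA_rowlen (i : Nat) (st : List (List Int) × Int × Int) (j k : Nat) :
    ((stepA i st j).1.getD k []).length = ((st.1.getD k []).length) := by
  unfold stepA is_squareA count_neighboursA
  dsimp only
  split
  · split <;> exact cnA_rowlen _ _ _ _ _
  · rfl

theorem step_eq (n i j : Nat) (st : List (List Int) × Int × Int)
    (hn : st.1.length = n) (hi : i < n) (hj : j < (st.1.getD i []).length) :
    stepA i st j = stepB n i st j := by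
  obtain ⟨d, sq, ci⟩ := st
  simp only at hn hj
  by_cases hc : (d.getD i []).getD j 0 = 1
  · have hcell : pyGet2 d (i : Int) (j : Int) = some 1 :=
      (cell_iff d i j 1).mpr ⟨by omega, hj, hc⟩
    unfold stepA stepB
    simp only [hcell, hc, if_pos, is_squareA, count_neighboursA]
    have hside : sideA d (i : Int) (j : Int) 0 (d.length + 1) = sideB d d.length j i 0 := by
      have := side_bridge (d.length + 1) d i j 0 (by omega)
      rw [show i + 0 = i from rfl] at this
      exact this
    have hcount : cnStack d [((i : Int), (j : Int))] 0 = cnA (ones d + 1) d (i : Int) (j : Int) :=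
      cnStack_single d _ _
    have hpos : 1 ≤ (cnA (ones d + 1) d (i : Int) (j : Int)).2 := cnA_pos (ones d) d _ _ hcell
    rw [hside, hcount, hn]
    by_cases heq : ((sideB d n j i 0 : Int)) * (sideB d n j i 0 : Int) = (cnA (ones d + 1) d (i : Int) (j : Int)).2
    · rw [if_pos heq]
      have h1 : ((sideB d n j i 0 : Int)) ^ 2 = (cnA (ones d + 1) d (i : Int) (j : Int)).2 := by
        rw [pow_two]; exact heq
      have h2 : (cnA (ones d + 1) d (i : Int) (j : Int)).2 ≠ 0 := by omega
      simp [h1, h2]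
    · rw [if_neg heq]
      have hne : ¬ (((sideB d n j i 0 : Int)) ^ 2 = (cnA (ones d + 1) d (i : Int) (j : Int)).2 ∧
          (cnA (ones d + 1) d (i : Int) (j : Int)).2 ≠ 0) := by
        rintro ⟨h1, -⟩
        exact heq (by rw [← pow_two]; exact h1)
      simp [hne]
  · have hcell : pyGet2 d (i : Int) (j : Int) = some ((d.getD i []).getD j 0) :=
      (cell_iff d i j _).mpr ⟨by omega, hj, rfl⟩
    unfold stepA stepB
    rw [if_neg (by rw [hcell]; simpa [List.getD_eq_getElem?_getD] using hc), if_neg hc]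

theorem row_eq (n : Nat) (st : List (List Int) × Int × Int) (i : Nat)
    (hn : st.1.length = n) (hi : i < n) : rowA st i = rowB n st i := by
  unfold rowA rowB
  apply foldl_congr_inv (P := fun st2 => st2.1.length = n ∧
    (st2.1.getD i []).length = (st.1.getD i []).length)
  · exact ⟨hn, rfl⟩
  · intro s2 a _ hP
    exact ⟨by rw [stepA_len, hP.1], by rw [stepA_rowlen, hP.2]⟩
  · intro s2 a ha hP
    exact step_eq n i a s2 hP.1 hi (by rw [hP.2]; exact List.mem_range.mp ha)

-- ===== VERDICT (by name: the statement is the Claim_ definition above) =====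
theorem figure_counter_spec : Claim_equal_figure_counter := by
  unfold Claim_equal_figure_counter Spec_figure_counter
  intro data _
  unfold figure_counter figure_counter_alt
  have main : (List.range data.length).foldl rowA (data, (0 : Int), (0 : Int)) =
      (List.range data.length).foldl (rowB data.length) (data, (0 : Int), (0 : Int)) := by
    apply foldl_congr_inv (P := fun st => st.1.length = data.length)
    · rfl
    · intro s2 a _ hP
      unfold rowA
      have := foldl_pres (P := fun st2 => st2.1.length = data.length) (stepA a)
        (List.range ((s2.1.getD a []).length)) s2 hP
        (fun s' j h' => by show (stepA a s' j).1.length = data.length; rw [stepA_len]; exact h')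
      exact this
    · intro s2 a ha hP
      exact row_eq data.length s2 a hP (List.mem_range.mp ha)
  rw [main]
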